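-- pv_equiv track=rewrite | github.com/Smart-AI-Memory/empathy | empathy_llm_toolkit/wizards/base_wizard.py | _render_plain_prompt
-- ===== SOURCE A (Python) =====
-- def _render_plain_prompt(
--
--     role: str,
--     goal: str,
--     instructions: list[str],
--     constraints: list[str],
--     input_payload: str,
-- ) -> str:
--     """Render plain text prompt (fallback for non-XML mode).
--
--     Args:
--         role: The role/expertise for the AI
--         goal: The primary objective
--         instructions: Step-by-step instructions
--         constraints: Guidelines and boundaries
--         input_payload: The input content
--
--     Returns:
--         Plain text formatted prompt
--
--     """
--     parts = [f"Role: {role}"]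
--     parts.append(f"Goal: {goal}")
--     parts.append("")
--
--     if instructions:
--         parts.append("Instructions:")
--         for i, inst in enumerate(instructions, 1):
--             parts.append(f"{i}. {inst}")
--         parts.append("")
--
--     if constraints:
--         parts.append("Guidelines:")
--         for constraint in constraints:
--             parts.append(f"- {constraint}")
--         parts.append("")
--
--     parts.append("Input:")
--     parts.append(input_payload)
--
--     return "\n".join(parts)
-- ===== SOURCE B (Python) =====
-- def _render_plain_prompt(
--     role: str,
--     goal: str,
--     instructions: list[str],
--     constraints: list[str],
--     input_payload: str,
-- ) -> str:
--     """Render the prompt as double-newline-joined section blocks."""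
--     blocks = [f"Role: {role}\nGoal: {goal}"]
--     if instructions:
--         numbered = "\n".join(f"{i}. {inst}" for i, inst in enumerate(instructions, 1))
--         blocks.append("Instructions:\n" + numbered)
--     if constraints:
--         bulleted = "\n".join(f"- {c}" for c in constraints)
--         blocks.append("Guidelines:\n" + bulleted)
--     blocks.append(f"Input:\n{input_payload}")
--     return "\n\n".join(blocks)
-- ===== Notes on version B (the rewrite author's own statement) =====
-- stated objective: alternative
-- what changed: B assembles self-contained multi-line section blocks and joins them with '\n\n', instead of A's flat parts list with empty-string sentinel lines joined by '\n'.
import Mathlib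
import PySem

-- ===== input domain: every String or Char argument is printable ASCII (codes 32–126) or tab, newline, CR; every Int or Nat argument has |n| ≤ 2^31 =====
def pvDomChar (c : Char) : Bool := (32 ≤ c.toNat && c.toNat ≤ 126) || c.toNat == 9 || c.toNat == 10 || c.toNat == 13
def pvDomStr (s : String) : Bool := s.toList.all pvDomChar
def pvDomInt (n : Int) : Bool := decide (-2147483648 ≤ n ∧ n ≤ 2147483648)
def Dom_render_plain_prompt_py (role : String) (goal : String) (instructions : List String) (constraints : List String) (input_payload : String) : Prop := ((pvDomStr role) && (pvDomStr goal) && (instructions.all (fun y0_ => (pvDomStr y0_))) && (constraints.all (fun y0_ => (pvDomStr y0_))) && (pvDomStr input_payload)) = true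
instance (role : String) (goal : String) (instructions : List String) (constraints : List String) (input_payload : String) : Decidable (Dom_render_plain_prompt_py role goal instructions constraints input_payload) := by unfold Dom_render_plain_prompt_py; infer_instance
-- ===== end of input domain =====

-- B builds self-contained section blocks joined by "\n\n" instead of A's flat
-- parts list with empty-string sentinel lines joined by "\n"; same output.

-- ===== PORT A =====
def render_plain_prompt_py (role : String) (goal : String) (instructions : List String) (constraints : List String) (input_payload : String) : String :=
  let parts : List String := ["Role: " ++ role]
  let parts := parts ++ ["Goal: " ++ goal]
  let parts := parts ++ [""]
  let parts :=
    if instructions.isEmpty then parts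
    else
      ((PySem.List.enumerate instructions 1).foldl
        (fun acc p => acc ++ [PySem.Int.toStr p.1 ++ ". " ++ p.2])
        (parts ++ ["Instructions:"])) ++ [""]
  let parts :=
    if constraints.isEmpty then parts
    else
      (constraints.foldl (fun acc c => acc ++ ["- " ++ c]) (parts ++ ["Guidelines:"])) ++ [""]
  let parts := parts ++ ["Input:"]
  let parts := parts ++ [input_payload]
  PySem.Str.join "\n" parts

-- ===== PORT B =====
def render_plain_prompt_py_alt (role : String) (goal : String) (instructions : List String) (constraints : List String) (input_payload : String) : String :=
  let blocks : List String := ["Role: " ++ role ++ "\n" ++ "Goal: " ++ goal]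
  let blocks :=
    if instructions.isEmpty then blocks
    else blocks ++ ["Instructions:\n" ++
      PySem.Str.join "\n" ((PySem.List.enumerate instructions 1).map
        (fun p => PySem.Int.toStr p.1 ++ ". " ++ p.2))]
  let blocks :=
    if constraints.isEmpty then blocks
    else blocks ++ ["Guidelines:\n" ++ PySem.Str.join "\n" (constraints.map (fun c => "- " ++ c))]
  let blocks := blocks ++ ["Input:\n" ++ input_payload]
  PySem.Str.join "\n\n" blocks

-- ===== PRECONDITION & SPEC =====
def Spec_render_plain_prompt_py (role : String) (goal : String) (instructions : List String) (constraints : List String) (input_payload : String) (out : String) : Prop := out = render_plain_prompt_py_alt role goal instructions constraints input_payload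
instance (role : String) (goal : String) (instructions : List String) (constraints : List String) (input_payload : String) (out : String) : Decidable (Spec_render_plain_prompt_py role goal instructions constraints input_payload out) := by unfold Spec_render_plain_prompt_py; infer_instance

-- ===== CLAIM (what is proved, stated in full; the proofs are below) =====
def Claim_equal_render_plain_prompt_py : Prop := ∀ (role : String) (goal : String) (instructions : List String) (constraints : List String) (input_payload : String), Dom_render_plain_prompt_py role goal instructions constraints input_payload → Spec_render_plain_prompt_py role goal instructions constraints input_payload (render_plain_prompt_py role goal instructions constraints input_payload)

-- ===== LEMMAS AND PROOFS =====

lemma join_append_ne (sep : List Char) (xs ys : List (List Char)) (hx : xs ≠ []) (hy : ys ≠ []) :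
    PySem.Chars.join sep (xs ++ ys) = PySem.Chars.join sep xs ++ sep ++ PySem.Chars.join sep ys := by
  induction xs with
  | nil => exact absurd rfl hx
  | cons x xs ih =>
    cases xs with
    | nil =>
      cases ys with
      | nil => exact absurd rfl hy
      | cons y ys => simp [PySem.Chars.join_cons_cons, PySem.Chars.join_singleton]
    | cons x' xs' =>
      have h := ih (by simp)
      simp only [List.cons_append, PySem.Chars.join_cons_cons] at *
      simp [h, List.append_assoc]

lemma join_cons_append (sep x : List Char) (xs : List (List Char)) (y : List Char) (ys : List (List Char)) :
    PySem.Chars.join sep (x :: (xs ++ y :: ys)) = PySem.Chars.join sep (x :: xs) ++ sep ++ PySem.Chars.join sep (y :: ys) := by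
  rw [← List.cons_append]
  exact join_append_ne sep (x :: xs) (y :: ys) (by simp) (by simp)

lemma flatten_map_sing {α β γ : Type} (f : β → γ) (g : α → β) (l : List α) :
    (List.map (List.map f ∘ fun x => [g x]) l).flatten = List.map (f ∘ g) l := by
  induction l with
  | nil => simp
  | cons a l ih => simp [ih, Function.comp]

lemma tl_nn : ("\n\n" : String).toList = ['\n', '\n'] := rfl
lemma tl_n : ("\n" : String).toList = ['\n'] := rfl
lemma tl_empty : ("" : String).toList = [] := rfl
lemma tl_instr : ("Instructions:\n" : String).toList = ("Instructions:" : String).toList ++ ['\n'] := rfl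
lemma tl_guide : ("Guidelines:\n" : String).toList = ("Guidelines:" : String).toList ++ ['\n'] := rfl
lemma tl_input : ("Input:\n" : String).toList = ("Input:" : String).toList ++ ['\n'] := rfl

-- ===== VERDICT (by name: the statement is the Claim_ definition above) =====
theorem render_plain_prompt_py_spec : Claim_equal_render_plain_prompt_py := by
  intro role goal instructions constraints input_payload _
  unfold Spec_render_plain_prompt_py
  rcases instructions with _ | ⟨i0, ir⟩ <;> rcases constraints with _ | ⟨c0, cr⟩ <;>
    (simp only [render_plain_prompt_py, render_plain_prompt_py_alt, PySem.Str.join,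
       List.isEmpty_cons, List.isEmpty_nil, if_true, if_false, Bool.false_eq_true]
     apply congrArg
     simp [join_append_ne, PySem.Chars.join_cons_cons, PySem.Chars.join_singleton,
       PySem.List.foldl_append_singleton_eq_map, join_cons_append, flatten_map_sing,
       PySem.List.enumerate_cons, List.map_cons, List.map_append, List.map_map,
       List.append_assoc, String.toList_append, tl_nn, tl_n, tl_empty, tl_instr,
       tl_guide, tl_input])
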